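-- pv_equiv track=rewrite | github.com/jp117/codesignal | Arcade/Intro/014 - alternatingSums.py | alternatingSums
-- ===== SOURCE A (Python) =====
-- def alternatingSums(x):
--     output = [0,0]
--     for i in range(len(x)):
--         if i%2 == 0:
--             output[0] += x[i]
--         else:
--             output[1] += x[i]
--     return output
-- ===== SOURCE B (Python) =====
-- def alternatingSums(x):
--     e = o = 0
--     n = len(x)
--     i = 0
--     while i + 1 < n:
--         e += x[i]
--         o += x[i + 1]
--         i += 2
--     if i < n:
--         e += x[i]
--     return [e, o]
-- ===== Notes on version B (the rewrite author's own statement) =====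
-- stated objective: alternative
-- what changed: Replaces the single loop that dispatches on i%2 with a stride-2 loop that consumes an (even, odd) pair of elements per iteration plus a final leftover element, with no parity test.
import Mathlib
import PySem

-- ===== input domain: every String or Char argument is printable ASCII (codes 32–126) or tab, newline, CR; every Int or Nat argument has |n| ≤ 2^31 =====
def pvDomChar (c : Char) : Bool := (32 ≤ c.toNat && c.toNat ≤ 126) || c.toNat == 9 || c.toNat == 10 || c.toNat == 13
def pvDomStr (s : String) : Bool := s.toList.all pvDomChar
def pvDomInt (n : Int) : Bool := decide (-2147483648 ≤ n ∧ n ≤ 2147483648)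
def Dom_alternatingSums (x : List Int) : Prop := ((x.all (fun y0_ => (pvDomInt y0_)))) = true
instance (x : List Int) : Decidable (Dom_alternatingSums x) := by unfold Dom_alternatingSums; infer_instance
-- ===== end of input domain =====

-- B replaces the indexed parity-dispatch loop by a stride-2 loop taking an (even, odd) pair per step (alternative decomposition, same cost).

-- ===== PORT A =====
-- output = [0,0] is kept as the pair (output[0], output[1]); the loop is the fold over range(len(x)).
def alternatingSums (x : List Int) : List Int :=
  let out := (PySem.List.pyRange 0 (x.length : Int) 1).foldl
    (fun (out : Int × Int) (i : Int) =>
      if PySem.Int.mod i 2 == 0 then (out.1 + PySem.List.pyGetD x i 0, out.2)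
      else (out.1, out.2 + PySem.List.pyGetD x i 0))
    (0, 0)
  [out.1, out.2]

-- ===== PORT B =====
-- the 'while i + 1 < n' loop (the trailing 'if i < n' runs once the loop exits, i.e. in the else branch here)
def altLoop (x : List Int) (n : Int) (i : Int) (e : Int) (o : Int) : Int × Int :=
  if _h : i + 1 < n then
    altLoop x n (i + 2) (e + PySem.List.pyGetD x i 0) (o + PySem.List.pyGetD x (i + 1) 0)
  else if i < n then (e + PySem.List.pyGetD x i 0, o)
  else (e, o)
termination_by (n - i).toNat
decreasing_by omega

def alternatingSums_alt (x : List Int) : List Int :=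
  let p := altLoop x (x.length : Int) 0 0 0
  [p.1, p.2]

-- ===== PRECONDITION & SPEC =====
def Spec_alternatingSums (x : List Int) (out : List Int) : Prop := out = alternatingSums_alt x
instance (x : List Int) (out : List Int) : Decidable (Spec_alternatingSums x out) := by unfold Spec_alternatingSums; infer_instance

-- ===== CLAIM (what is proved, stated in full; the proofs are below) =====
def Claim_equal_alternatingSums : Prop := ∀ (x : List Int), Dom_alternatingSums x → Spec_alternatingSums x (alternatingSums x)

-- ===== LEMMAS AND PROOFS =====

-- Common reference: pair of (even-index sum, odd-index sum), two elements at a time.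
def altGo : List Int → Int × Int
  | [] => (0, 0)
  | [a] => (a, 0)
  | a :: b :: rest => (a + (altGo rest).1, b + (altGo rest).2)

-- A's loop body, on an (index, value) pair.
def aBody (out : Int × Int) (p : Int × Int) : Int × Int :=
  if PySem.Int.mod p.1 2 == 0 then (out.1 + p.2, out.2)
  else (out.1, out.2 + p.2)

-- Invariant of A's loop, on the enumerated list, starting at an even index 2*k.
theorem fold_enum (xs : List Int) : ∀ (k : Nat) (acc : Int × Int),
    (PySem.List.enumerate xs (2 * (k : Int))).foldl aBody acc
      = (acc.1 + (altGo xs).1, acc.2 + (altGo xs).2) := by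
  induction xs using altGo.induct with
  | case1 => intro k acc; simp [PySem.List.enumerate_nil, altGo]
  | case2 a =>
    intro k acc
    simp [PySem.List.enumerate_cons, PySem.List.enumerate_nil, altGo, aBody, PySem.Int.mod]
  | case3 a b rest ih =>
    intro k acc
    have h2 : (2 * (k : Int)) + 1 + 1 = 2 * ((k + 1 : Nat) : Int) := by push_cast; ring
    simp only [PySem.List.enumerate_cons, List.foldl_cons, h2]
    rw [ih (k + 1)]
    simp [aBody, PySem.Int.mod, altGo]
    constructor <;> ring

theorem fold_pyRange_eq (x : List Int) :
    (PySem.List.pyRange 0 (x.length : Int) 1).foldl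
      (fun (out : Int × Int) (i : Int) =>
        if PySem.Int.mod i 2 == 0 then (out.1 + PySem.List.pyGetD x i 0, out.2)
        else (out.1, out.2 + PySem.List.pyGetD x i 0))
      (0, 0) = altGo x := by
  have he := PySem.List.enumerate_eq_map_pyRange (xs := x) (d := 0)
  have : (PySem.List.enumerate x 0).foldl aBody (0, 0)
      = (PySem.List.pyRange 0 (x.length : Int) 1).foldl
          (fun (out : Int × Int) (i : Int) =>
            if PySem.Int.mod i 2 == 0 then (out.1 + PySem.List.pyGetD x i 0, out.2)
            else (out.1, out.2 + PySem.List.pyGetD x i 0)) (0, 0) := by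
    rw [he, List.foldl_map]
    rfl
  rw [← this]
  have h := fold_enum x 0 (0, 0)
  norm_num at h
  simpa using h

-- Invariant of B's loop: from position i it adds the alternating sums of x.drop i.
theorem altLoop_eq (x : List Int) : ∀ (xs : List Int) (i : Nat) (e o : Int),
    xs = x.drop i →
    altLoop x (x.length : Int) (i : Int) e o = (e + (altGo xs).1, o + (altGo xs).2) := by
  intro xs
  induction xs using altGo.induct with
  | case1 =>
    intro i e o hdrop
    have hlen : x.length ≤ i := by
      by_contra hlt
      have : x.drop i ≠ [] := by simp; omega
      exact this hdrop.symm
    rw [altLoop]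
    have hc1 : ¬ ((i : Int) + 1 < (x.length : Int)) := by omega
    have hc2 : ¬ ((i : Int) < (x.length : Int)) := by omega
    simp [hc1, hc2, altGo]
  | case2 a =>
    intro i e o hdrop
    have hlen : (x.drop i).length = 1 := by rw [← hdrop]; rfl
    have hlen' : x.length - i = 1 := by simpa using hlen
    have hi : i < x.length := by omega
    have hxa : x[i]?.getD 0 = a := by
      have h0 : (x.drop i)[0]?.getD 0 = a := by rw [← hdrop]; rfl
      simpa [List.getElem?_drop] using h0
    rw [altLoop]
    have hc1 : ¬ ((i : Int) + 1 < (x.length : Int)) := by omega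
    have hc2 : (i : Int) < (x.length : Int) := by omega
    simp [hc1, hc2, altGo, PySem.List.pyGetD_natCast, hxa]
  | case3 a b rest ih =>
    intro i e o hdrop
    have hlen : 2 ≤ (x.drop i).length := by rw [← hdrop]; simp
    have hi1 : i + 1 < x.length := by simp at hlen; omega
    have hxa : x.getD i 0 = a := by
      have h0 : (x.drop i).getD 0 0 = a := by rw [← hdrop]; rfl
      simpa [List.getD_eq_getElem?_getD, List.getElem?_drop] using h0
    have hxb : x.getD (i + 1) 0 = b := by
      have h0 : (x.drop i).getD 1 0 = b := by rw [← hdrop]; rfl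
      simpa [List.getD_eq_getElem?_getD, List.getElem?_drop] using h0
    have hrest : rest = x.drop (i + 2) := by
      have hdd : x.drop (i + 2) = (x.drop i).drop 2 := by
        rw [List.drop_drop, Nat.add_comm]
      rw [hdd, ← hdrop]
      rfl
    rw [altLoop]
    have hc1 : ((i : Int) + 1 < (x.length : Int)) := by omega
    have h2 : (i : Int) + 2 = ((i + 2 : Nat) : Int) := by push_cast; ring
    simp only [hc1, dif_pos, h2, PySem.List.pyGetD_natCast]
    have h1 : (i : Int) + 1 = ((i + 1 : Nat) : Int) := by push_cast; ring
    rw [h1, PySem.List.pyGetD_natCast]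
    rw [ih (i + 2) _ _ hrest]
    simp only [altGo, Prod.mk.injEq]
    rw [hxa, hxb]
    constructor <;> ring

-- ===== VERDICT (by name: the statement is the Claim_ definition above) =====
theorem alternatingSums_spec : Claim_equal_alternatingSums := by
  intro x _
  unfold Spec_alternatingSums alternatingSums alternatingSums_alt
  rw [fold_pyRange_eq]
  have h := altLoop_eq x x 0 0 0 (by simp)
  norm_num at h
  rw [h]
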